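-- pv_equiv track=rewrite | github.com/ennuiweb/psyk-podcast | podcast-tools/storage_backends.py | _matches_mime_type
-- ===== SOURCE A (Python) =====
-- from typing import Any, Dict, Iterable, List, Optional, Protocol, Sequence, Tuple
--
-- def _matches_mime_type(mime_type: str, filters: Optional[Iterable[str]]) -> bool:
--     rules = [str(rule).strip() for rule in (filters or []) if str(rule).strip()]
--     if not rules:
--         return True
--     normalized = mime_type.casefold()
--     for rule in rules:
--         candidate = rule.casefold()
--         if candidate.endswith("/"):
--             if normalized.startswith(candidate):
--                 return True
--         elif normalized == candidate:
--             return True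
--     return False
-- ===== SOURCE B (Python) =====
-- def _matches_mime_type(mime_type, filters):
--     rules = [str(rule).strip() for rule in (filters or []) if str(rule).strip()]
--     if not rules:
--         return True
--     normalized = mime_type.casefold()
--     # Index the MIME TYPE instead of scanning rule shapes: the only strings that can
--     # match are normalized itself (exact rule) and each prefix of normalized that ends
--     # right after a '/' (prefix rule). Collect those keys once, then test each rule
--     # by a single set lookup.
--     keys = {normalized}
--     for i, ch in enumerate(normalized):
--         if ch == '/':
--             keys.add(normalized[:i + 1])
--     return any(rule.casefold() in keys for rule in rules)
-- ===== Notes on version B (the rewrite author's own statement) =====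
-- stated objective: alternative
-- what changed: B inverts the scan: instead of testing rule shapes against the mime type, it derives from the normalized mime type the finite set of strings that could possibly match it (the full string plus every prefix ending at a '/') and then answers by looking each casefolded rule up in that set.
import Mathlib
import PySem

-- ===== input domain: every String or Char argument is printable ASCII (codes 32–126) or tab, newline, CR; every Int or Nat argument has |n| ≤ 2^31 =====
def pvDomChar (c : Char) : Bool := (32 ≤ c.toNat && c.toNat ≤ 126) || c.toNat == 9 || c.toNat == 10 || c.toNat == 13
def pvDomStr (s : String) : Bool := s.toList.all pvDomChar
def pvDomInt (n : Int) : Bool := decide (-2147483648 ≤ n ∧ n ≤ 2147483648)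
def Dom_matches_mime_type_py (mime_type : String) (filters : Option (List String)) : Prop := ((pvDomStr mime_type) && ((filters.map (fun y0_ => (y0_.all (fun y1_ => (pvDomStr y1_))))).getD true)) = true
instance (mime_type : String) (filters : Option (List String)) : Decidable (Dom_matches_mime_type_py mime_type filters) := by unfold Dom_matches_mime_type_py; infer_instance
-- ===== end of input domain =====

-- B inverts A's scan: from the normalized mime type it derives once the set of all strings
-- that can match it (the string itself plus each prefix ending at a '/') and then tests each
-- casefolded rule by one set lookup; an alternative decomposition, no speed claim.
-- casefold is ported as PySem.Str.lower, exact on the ASCII domain.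

-- ===== PORT A =====
-- [str(rule).strip() for rule in (filters or []) if str(rule).strip()]
def pvCleanRules (filters : Option (List String)) : List String :=
  ((filters.getD []).filter (fun r => !(PySem.Str.strip r == ""))).map (fun r => PySem.Str.strip r)

-- A's for-loop with its early returns, as structural recursion
def pvLoopA (normalized : String) : List String → Bool
  | [] => false
  | rule :: rest =>
    let candidate := PySem.Str.lower rule
    if PySem.Str.endswith candidate "/" then
      if PySem.Str.startswith normalized candidate then true
      else pvLoopA normalized rest
    else if normalized == candidate then true
    else pvLoopA normalized rest

def matches_mime_type_py (mime_type : String) (filters : Option (List String)) : Bool :=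
  let rules := pvCleanRules filters
  if rules = [] then true
  else pvLoopA (PySem.Str.lower mime_type) rules

-- ===== PORT B =====
-- keys = {normalized} plus, for i, ch in enumerate(normalized), normalized[:i+1] when ch == '/'
def pvKeys (normalized : String) : PySem.Set String :=
  (PySem.List.enumerate normalized.toList 0).foldl
    (fun ks p =>
      if p.2 == '/' then PySem.Set.add ks (PySem.Str.slice normalized none (some (p.1 + 1)))
      else ks)
    (PySem.Set.add PySem.Set.empty normalized)

def matches_mime_type_py_alt (mime_type : String) (filters : Option (List String)) : Bool :=
  let rules := ((filters.getD []).filter (fun r => !(PySem.Str.strip r == ""))).map (fun r => PySem.Str.strip r)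
  if rules = [] then true
  else
    let normalized := PySem.Str.lower mime_type
    let keys := pvKeys normalized
    rules.any (fun rule => PySem.Set.contains keys (PySem.Str.lower rule))

-- ===== PRECONDITION & SPEC =====
def Spec_matches_mime_type_py (mime_type : String) (filters : Option (List String)) (out : Bool) : Prop := out = matches_mime_type_py_alt mime_type filters
instance (mime_type : String) (filters : Option (List String)) (out : Bool) : Decidable (Spec_matches_mime_type_py mime_type filters out) := by unfold Spec_matches_mime_type_py; infer_instance

-- ===== CLAIM (what is proved, stated in full; the proofs are below) =====
def Claim_equal_matches_mime_type_py : Prop := ∀ (mime_type : String) (filters : Option (List String)), Dom_matches_mime_type_py mime_type filters → Spec_matches_mime_type_py mime_type filters (matches_mime_type_py mime_type filters)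

-- ===== LEMMAS AND PROOFS =====
theorem pvContains_add (s : PySem.Set String) (c n : String) :
    PySem.Set.contains (PySem.Set.add s c) n = (PySem.Set.contains s n || n == c) := by
  simp only [PySem.Set.add]
  cases hb : n == c <;>
    split_ifs with h <;>
      simp_all [PySem.Set.contains, List.contains_eq_mem]

-- membership in a conditional-add fold over any list
theorem pvContains_foldl (f : Int × Char → String) (l : List (Int × Char)) (s : PySem.Set String) (c : String) :
    PySem.Set.contains
      (l.foldl (fun ks p => if p.2 == '/' then PySem.Set.add ks (f p) else ks) s) c
    = (PySem.Set.contains s c || l.any (fun p => p.2 == '/' && c == f p)) := by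
  induction l generalizing s with
  | nil => simp
  | cons p rest ih =>
    simp only [List.foldl_cons, List.any_cons]
    by_cases hp : (p.2 == '/') = true
    · rw [if_pos hp, ih, pvContains_add, hp]
      cases PySem.Set.contains s c <;> simp
    · rw [if_neg hp, ih]
      rw [Bool.not_eq_true] at hp
      simp [hp]

-- normalized[:k+1] on the list side is take (k+1)
theorem pvSlice_take (n : String) (k : Nat) :
    (PySem.Str.slice n none (some (0 + (k : Int) + 1))).toList = n.toList.take (k + 1) := by
  have hb : (PySem.Str.slice n none (some (0 + (k : Int) + 1))).toList
      = PySem.List.slice n.toList none (some (0 + (k : Int) + 1)) := by simp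
  rw [hb, PySem.List.slice_to n.toList (by positivity)]
  congr 1
  omega

-- the key set characterized: c ∈ pvKeys n  ⟺  c = n, or c ends in '/' and is a prefix of n
theorem pvContains_pvKeys (n c : String) :
    PySem.Set.contains (pvKeys n) c
      = (c == n || (PySem.Str.endswith c "/" && PySem.Str.startswith n c)) := by
  unfold pvKeys
  rw [pvContains_foldl]
  have hempty : PySem.Set.contains (PySem.Set.add PySem.Set.empty n) c = (c == n) := by
    rw [Bool.eq_iff_iff]
    simp [PySem.Set.empty, PySem.Set.add, PySem.Set.contains, List.contains_eq_mem]
  rw [hempty]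
  have hany :
      ((PySem.List.enumerate n.toList 0).any
        (fun p => p.2 == '/' && c == PySem.Str.slice n none (some (p.1 + 1))))
      = (PySem.Str.endswith c "/" && PySem.Str.startswith n c) := by
    rw [Bool.eq_iff_iff]
    simp only [List.any_eq_true, PySem.List.mem_enumerate_iff, Bool.and_eq_true, beq_iff_eq,
      PySem.Str.endswith_eq, PySem.Str.startswith_eq, PySem.Chars.endswith_iff,
      PySem.Chars.startswith_iff]
    constructor
    · rintro ⟨p, ⟨k, hk, rfl⟩, h1, h2⟩
      have hc : c.toList = n.toList.take (k + 1) := by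
        rw [h2]; exact pvSlice_take n k
      have h1' : n.toList[k] = '/' := h1
      constructor
      · refine ⟨n.toList.take k, ?_⟩
        rw [hc, List.take_add_one]
        simp [List.getElem?_eq_getElem hk, h1']
      · rw [hc]; exact List.take_prefix _ _
    · rintro ⟨⟨t, ht⟩, hpre⟩
      have hlen : c.toList.length = t.length + 1 := by
        rw [← ht]; simp
      have hle : c.toList.length ≤ n.toList.length := hpre.length_le
      have hk : t.length < n.toList.length := by omega
      refine ⟨(0 + (t.length : Int), n.toList[t.length]), ⟨t.length, hk, rfl⟩, ?_, ?_⟩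
      · have hcidx : c.toList[t.length]'(by omega) = '/' := by
          simp [← ht]
        have hpe := hpre.getElem (i := t.length) (by omega)
        exact hpe.symm.trans hcidx
      · rw [← String.toList_inj, pvSlice_take n t.length]
        have := List.prefix_iff_eq_take.mp hpre
        rw [this, hlen]
  rw [hany]

-- A's loop as an 'any' over the same predicate
theorem pvLoopA_eq_any (n : String) (rules : List String) :
    pvLoopA n rules = rules.any (fun rule =>
      let c := PySem.Str.lower rule
      if PySem.Str.endswith c "/" then PySem.Str.startswith n c else n == c) := by
  induction rules with
  | nil => simp [pvLoopA]
  | cons rule rest ih =>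
    simp only [pvLoopA, List.any_cons, ih]
    split_ifs <;> simp_all

-- per-rule agreement of the two predicates
theorem pvPred_eq (n c : String) :
    PySem.Set.contains (pvKeys n) c
      = (if PySem.Str.endswith c "/" then PySem.Str.startswith n c else n == c) := by
  rw [pvContains_pvKeys]
  cases he : PySem.Str.endswith c "/"
  · simp only [Bool.false_and, Bool.or_false, Bool.false_eq_true, if_false]
    rw [Bool.eq_iff_iff]
    simp only [beq_iff_eq]
    exact eq_comm
  · simp only [Bool.true_and, if_true]
    cases hb : (c == n)
    · simp
    · have hcn : c = n := by simpa using hb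
      subst hcn
      have hs : PySem.Chars.startswith c.toList c.toList = true := by
        rw [PySem.Chars.startswith_iff]
      simp [hs]

-- ===== VERDICT (by name: the statement is the Claim_ definition above) =====
theorem matches_mime_type_py_spec : Claim_equal_matches_mime_type_py := by
  intro mime_type filters _
  unfold Spec_matches_mime_type_py matches_mime_type_py matches_mime_type_py_alt pvCleanRules
  set rules := ((filters.getD []).filter (fun r => !(PySem.Str.strip r == ""))).map (fun r => PySem.Str.strip r) with hr
  by_cases h : rules = []
  · simp [h]
  · simp only [h, if_false]
    rw [pvLoopA_eq_any]
    exact List.any_congr rfl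
      (fun rule => (pvPred_eq (PySem.Str.lower mime_type) (PySem.Str.lower rule)).symm)
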